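-- pv_equiv track=rewrite | github.com/anedelcheva/Programming101-HackBulgaria | week1/3-The-Final-Round/prepare_meal.py | prepare_meal
-- ===== SOURCE A (Python) =====
-- def prepare_meal(number):
--     n = 1
--     counter = 0
--     spam = ''
--     eggs = ''
--     while number >= (3 ** n):
--         if number % (3 ** n) == 0:
--             counter = n
--         n += 1
--     if counter == 0:
--         spam = ''
--     else:
--         spam = counter * 'spam '
--     if spam == '' and number % 5 == 0:
--         eggs = 'eggs'
--     elif spam != '' and number % 5 == 0:
--         eggs = 'and eggs'
--     return spam + eggs
-- ===== SOURCE B (Python) =====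
-- def prepare_meal(number):
--     m, counter = number, 0
--     while m > 0 and m % 3 == 0:
--         counter += 1
--         m //= 3
--     spam = counter * 'spam '
--     if number % 5 == 0:
--         eggs = 'eggs' if counter == 0 else 'and eggs'
--     else:
--         eggs = ''
--     return spam + eggs
-- ===== Notes on version B (the rewrite author's own statement) =====
-- stated objective: simpler
-- what changed: Replaces the scan of all powers 3^n up to number (recomputing 3**n and number % 3**n each step) by repeated division by 3 that counts the exponent directly, and collapses the two eggs branches into one mod-5 test.
import Mathlib
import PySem

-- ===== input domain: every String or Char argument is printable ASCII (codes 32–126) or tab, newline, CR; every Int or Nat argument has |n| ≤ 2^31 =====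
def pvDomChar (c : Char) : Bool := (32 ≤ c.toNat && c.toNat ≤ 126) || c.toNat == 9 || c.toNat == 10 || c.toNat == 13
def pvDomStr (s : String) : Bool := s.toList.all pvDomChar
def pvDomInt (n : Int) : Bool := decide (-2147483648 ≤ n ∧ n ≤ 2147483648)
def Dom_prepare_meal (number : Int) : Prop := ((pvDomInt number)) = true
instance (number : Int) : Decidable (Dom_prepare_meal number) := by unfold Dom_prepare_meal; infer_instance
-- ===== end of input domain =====

-- B replaces A's scan over all powers 3^n ≤ number by repeated division by 3 counting the
-- exponent directly, and merges the two eggs branches into one mod-5 test (objective: simpler).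

-- ===== PORT A =====
-- Python's `counter * 'spam '`
def pvStrRepeat (n : Nat) (s : String) : String :=
  match n with
  | 0 => ""
  | k + 1 => s ++ pvStrRepeat k s

-- the while-loop of A; fuel 64 is ample: within Dom, |number| ≤ 2^31 < 3^(1+64), so the
-- loop always exits via its own `number < 3^n` test before fuel runs out
def prepareLoopA (number : Int) (n : Nat) (counter : Nat) (fuel : Nat) : Nat :=
  match fuel with
  | 0 => counter
  | fuel + 1 =>
    if (3 : Int) ^ n ≤ number then
      prepareLoopA number (n + 1)
        (if PySem.Int.mod number ((3 : Int) ^ n) = 0 then n else counter) fuel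
    else counter

def prepare_meal (number : Int) : String :=
  let counter := prepareLoopA number 1 0 64
  let spam := if counter = 0 then "" else pvStrRepeat counter "spam "
  let eggs :=
    if spam = "" ∧ PySem.Int.mod number 5 = 0 then "eggs"
    else if spam ≠ "" ∧ PySem.Int.mod number 5 = 0 then "and eggs"
    else ""
  spam ++ eggs

-- ===== PORT B =====
-- the while-loop of B; same fuel remark (counter ≤ log₃ 2^31 < 64 within Dom)
def prepareLoopB (m : Int) (counter : Nat) (fuel : Nat) : Nat :=
  match fuel with
  | 0 => counter
  | fuel + 1 =>
    if 0 < m ∧ PySem.Int.mod m 3 = 0 then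
      prepareLoopB (PySem.Int.floordiv m 3) (counter + 1) fuel
    else counter

def prepare_meal_alt (number : Int) : String :=
  let counter := prepareLoopB number 0 64
  let spam := pvStrRepeat counter "spam "
  let eggs :=
    if PySem.Int.mod number 5 = 0 then (if counter = 0 then "eggs" else "and eggs") else ""
  spam ++ eggs

-- ===== PRECONDITION & SPEC =====
def Spec_prepare_meal (number : Int) (out : String) : Prop := out = prepare_meal_alt number
instance (number : Int) (out : String) : Decidable (Spec_prepare_meal number out) := by unfold Spec_prepare_meal; infer_instance

-- ===== CLAIM (what is proved, stated in full; the proofs are below) =====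
def Claim_equal_prepare_meal : Prop := ∀ (number : Int), Dom_prepare_meal number → Spec_prepare_meal number (prepare_meal number)

-- ===== LEMMAS AND PROOFS =====

theorem pvStrRepeat_succ_ne_empty (k : Nat) : pvStrRepeat (k + 1) "spam " ≠ "" := by
  intro h
  have : (pvStrRepeat (k + 1) "spam ").length = 0 := by rw [h]; rfl
  simp [pvStrRepeat, String.length_append] at this

-- B's loop computes counter + v₃(m) for positive m (fuel large enough)
theorem prepareLoopB_val (fuel : Nat) : ∀ (m : Int) (c : Nat), 0 < m → m < (3 : Int) ^ fuel →
    prepareLoopB m c fuel = c + padicValNat 3 m.toNat := by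
  induction fuel with
  | zero => intro m c hm hlt; simp at hlt; omega
  | succ fuel ih =>
    intro m c hm hlt
    by_cases h3 : (3 : Int) ∣ m
    · obtain ⟨m', rfl⟩ := h3
      have hm' : 0 < m' := by nlinarith
      have hmod : PySem.Int.mod (3 * m') 3 = 0 := by
        rw [(PySem.Int.mod_eq_zero_iff_dvd _ _)]
        exact Dvd.intro m' rfl
      have hdiv : PySem.Int.floordiv (3 * m') 3 = m' := by
        rw [PySem.Int.floordiv_eq_ediv_of_pos (by norm_num)]
        simp [Int.mul_ediv_cancel_left _ (by norm_num : (3:Int) ≠ 0)]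
      have hlt' : m' < (3 : Int) ^ fuel := by
        have := hlt
        rw [pow_succ] at this
        nlinarith
      have htn : (3 * m').toNat = 3 * m'.toNat := by omega
      rw [prepareLoopB, if_pos ⟨hm, hmod⟩, hdiv, ih m' (c + 1) hm' hlt', htn]
      have hk0 : m'.toNat ≠ 0 := by omega
      rw [padicValNat.mul (p := 3) (by norm_num) hk0]
      haveI : Fact (Nat.Prime 3) := ⟨by norm_num⟩
      have : padicValNat 3 3 = 1 := padicValNat_self
      omega
    · have hmod : ¬ PySem.Int.mod m 3 = 0 := by
        rw [(PySem.Int.mod_eq_zero_iff_dvd _ _)]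
        exact h3
      rw [prepareLoopB, if_neg (by tauto)]
      have : ¬ (3 : Nat) ∣ m.toNat := by
        intro hd
        exact h3 (by exact_mod_cast (Int.toNat_of_nonneg hm.le) ▸ Int.natCast_dvd_natCast.mpr hd)
      rw [padicValNat.eq_zero_of_not_dvd this]
      omega

-- A's loop invariant: entering with counter = min (n-1) v it returns v
theorem prepareLoopA_val (fuel : Nat) : ∀ (m : Int) (n c : Nat), 0 < m → 1 ≤ n →
    m.toNat < 3 ^ (n + fuel) → c = min (n - 1) (padicValNat 3 m.toNat) →
    prepareLoopA m n c fuel = padicValNat 3 m.toNat := by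
  induction fuel with
  | zero =>
    intro m n c hm hn hlt hc
    rw [Nat.add_zero] at hlt
    have hvle : 3 ^ padicValNat 3 m.toNat ≤ m.toNat :=
      Nat.le_of_dvd (by omega) pow_padicValNat_dvd
    have : padicValNat 3 m.toNat < n := by
      by_contra hcon
      push Not at hcon
      have : (3:Nat) ^ n ≤ 3 ^ padicValNat 3 m.toNat := Nat.pow_le_pow_right (by norm_num) hcon
      omega
    simpa [prepareLoopA] using by omega
  | succ fuel ih =>
    intro m n c hm hn hlt hc
    set v := padicValNat 3 m.toNat with hv
    by_cases hge : (3 : Int) ^ n ≤ m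
    · have hgeN : (3:Nat) ^ n ≤ m.toNat := by
        have : ((3:Nat) ^ n : Int) ≤ m := by push_cast; exact hge
        omega
      have hdvd_iff : PySem.Int.mod m ((3:Int) ^ n) = 0 ↔ n ≤ v := by
        rw [PySem.Int.mod_eq_zero_iff_dvd _ _]
        constructor
        · intro hd
          have : (3:Nat) ^ n ∣ m.toNat := by
            rcases Int.eq_ofNat_of_zero_le hm.le with ⟨k, rfl⟩
            exact_mod_cast hd
          exact (padicValNat_dvd_iff_le_of_ne_one (by norm_num) (by omega)).mp this
        · intro hle
          have : (3:Nat) ^ n ∣ m.toNat :=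
            (padicValNat_dvd_iff_le_of_ne_one (by norm_num) (by omega)).mpr hle
          rcases Int.eq_ofNat_of_zero_le hm.le with ⟨k, rfl⟩
          exact_mod_cast Int.natCast_dvd_natCast.mpr this
      rw [prepareLoopA, if_pos hge]
      apply ih m (n + 1) _ hm (by omega)
        (by have := hlt; rwa [show n + (fuel + 1) = n + 1 + fuel from by omega] at this)
      by_cases hnv : n ≤ v
      · rw [if_pos (hdvd_iff.mpr hnv)]; omega
      · rw [if_neg (fun h => hnv (hdvd_iff.mp h))]; omega
    · have hltN : m.toNat < 3 ^ n := by
        have : m < ((3:Nat) ^ n : Int) := by push_cast; omega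
        omega
      have hvle : 3 ^ v ≤ m.toNat := Nat.le_of_dvd (by omega) pow_padicValNat_dvd
      have : v < n := by
        by_contra hcon
        push Not at hcon
        have : (3:Nat) ^ n ≤ 3 ^ v := Nat.pow_le_pow_right (by norm_num) hcon
        omega
      rw [prepareLoopA, if_neg hge]
      omega

theorem loops_agree (number : Int) (h : Dom_prepare_meal number) :
    prepareLoopA number 1 0 64 = prepareLoopB number 0 64 := by
  have hb : number ≤ 2147483648 := by
    unfold Dom_prepare_meal pvDomInt at h
    simpa using (of_decide_eq_true h).2
  by_cases hm : 0 < number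
  · rw [prepareLoopA_val 64 number 1 0 hm (by norm_num)
      (by have : (3:Nat) ^ 65 > 2147483648 := by norm_num
          omega) (by simp)]
    rw [prepareLoopB_val 64 number 0 hm
      (by have : ((3:Int) ^ 64) > 2147483648 := by norm_num
          omega)]
    omega
  · have h1 : ¬ (3 : Int) ^ 1 ≤ number := by push Not; norm_num; omega
    rw [show (64:Nat) = 63 + 1 from rfl]
    rw [prepareLoopA, if_neg (by simpa using h1), prepareLoopB, if_neg (by tauto)]

-- ===== VERDICT (by name: the statement is the Claim_ definition above) =====
theorem prepare_meal_spec : Claim_equal_prepare_meal := by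
  intro number hdom
  unfold Spec_prepare_meal prepare_meal prepare_meal_alt
  rw [loops_agree number hdom]
  set c := prepareLoopB number 0 64 with hc
  cases c with
  | zero => simp [pvStrRepeat]
  | succ k =>
    have hne := pvStrRepeat_succ_ne_empty k
    by_cases h5 : PySem.Int.mod number 5 = 0
    · simp [hne, h5]
    · simp [hne, h5]
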